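-- pv_equiv track=rewrite | github.com/wazuh/wazuh | tools/policy-migration/refactor_regex.py | left_to_right_escape_unescaped_brackets
-- ===== SOURCE A (Python) =====
-- from typing import List, Tuple, Set, Optional
--
-- def left_to_right_escape_unescaped_brackets(pattern: str, quote_char: Optional[str]) -> str:
--     """Escape unescaped '[' and ']' according to line quote style.
--     - Double-quoted line (quote_char == '"'): add two backslashes before bracket
--     - Single-quoted or unquoted: add one backslash before bracket
--     Leaves already escaped brackets as-is.
--     """
--     out: List[str] = []
--     i = 0
--     n = len(pattern)
--
--     def count_backslashes_before(index: int) -> int: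
--         cnt = 0
--         k = index - 1
--         while k >= 0 and pattern[k] == '\\':
--             cnt += 1
--             k -= 1
--         return cnt
--
--     while i < n:
--         ch = pattern[i]
--         if ch in ('[', ']'):
--             cnt = count_backslashes_before(i)
--             if quote_char == '"':
--                 # Consider escaped only if there are at least two preceding backslashes and the count is even (2, 4, ...)
--                 escaped = (cnt >= 2 and (cnt % 2 == 0))
--                 if not escaped:
--                     out.append('\\\\')
--                     out.append(ch)
--                     i += 1
--                     continue
--             else:
--                 # Single-quoted or unquoted: escaped if odd number of preceding backslashes
--                 escaped = (cnt % 2 == 1)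
--                 if not escaped:
--                     out.append('\\')
--                     out.append(ch)
--                     i += 1
--                     continue
--         out.append(ch)
--         i += 1
--     return ''.join(out)
-- ===== SOURCE B (Python) =====
-- from typing import Optional
--
-- def left_to_right_escape_unescaped_brackets(pattern: str, quote_char: Optional[str]) -> str:
--     # One pass: track the run of consecutive backslashes ending just before the
--     # current character, instead of rescanning backwards at every bracket.
--     out = []
--     run = 0
--     for ch in pattern:
--         if ch == '[' or ch == ']':
--             if quote_char == '"':
--                 if not (run >= 2 and run % 2 == 0):
--                     out.append('\\\\')
--             else:
--                 if run % 2 == 0: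
--                     out.append('\\')
--             out.append(ch)
--             run = 0
--         else:
--             run = run + 1 if ch == '\\' else 0
--             out.append(ch)
--     return ''.join(out)
-- ===== Notes on version B (the rewrite author's own statement) =====
-- stated objective: faster
-- what changed: B replaces A's backward rescan of preceding backslashes at every bracket with a single left-to-right pass that maintains the current consecutive-backslash run count incrementally.
import Mathlib
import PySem

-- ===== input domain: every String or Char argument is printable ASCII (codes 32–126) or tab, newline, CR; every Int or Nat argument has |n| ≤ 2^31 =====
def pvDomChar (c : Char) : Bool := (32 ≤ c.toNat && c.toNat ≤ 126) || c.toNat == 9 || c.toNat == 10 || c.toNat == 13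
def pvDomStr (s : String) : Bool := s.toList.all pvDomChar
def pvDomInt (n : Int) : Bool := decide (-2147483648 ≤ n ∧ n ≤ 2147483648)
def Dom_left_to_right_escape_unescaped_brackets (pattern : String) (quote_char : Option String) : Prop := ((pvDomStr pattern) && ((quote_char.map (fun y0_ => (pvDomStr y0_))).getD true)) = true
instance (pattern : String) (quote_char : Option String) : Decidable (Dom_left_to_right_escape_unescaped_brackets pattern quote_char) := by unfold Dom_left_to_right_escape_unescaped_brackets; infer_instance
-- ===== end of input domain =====

-- B replaces A's backward rescan of backslashes at each bracket with one pass keeping an incremental run count (objective: faster).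

-- ===== PORT A =====
-- A's inner helper: count consecutive backslashes in `cs` just before `index`, scanning backwards.
def pvCountBack (cs : List Char) : Nat → Nat
  | 0 => 0
  | k + 1 => if cs.getD k ' ' = '\\' then pvCountBack cs k + 1 else 0

-- A's while loop over index i; `rest` is the suffix cs.drop i, recursed on for termination.
def pvLoopA (quote_char : Option String) (cs : List Char) (i : Nat) : List Char → List Char
  | [] => []
  | ch :: rs =>
    if ch = '[' ∨ ch = ']' then
      let cnt := pvCountBack cs i
      if quote_char = some "\"" then
        if ¬ (cnt ≥ 2 ∧ cnt % 2 = 0) then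
          '\\' :: '\\' :: ch :: pvLoopA quote_char cs (i + 1) rs
        else
          ch :: pvLoopA quote_char cs (i + 1) rs
      else
        if ¬ (cnt % 2 = 1) then
          '\\' :: ch :: pvLoopA quote_char cs (i + 1) rs
        else
          ch :: pvLoopA quote_char cs (i + 1) rs
    else
      ch :: pvLoopA quote_char cs (i + 1) rs

def left_to_right_escape_unescaped_brackets (pattern : String) (quote_char : Option String) : String :=
  String.ofList (pvLoopA quote_char pattern.toList 0 pattern.toList)

-- ===== PORT B =====
-- B's single pass: `run` is the length of the consecutive-backslash run ending just before the current char.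
def pvLoopB (quote_char : Option String) : List Char → Nat → List Char
  | [], _ => []
  | ch :: rs, run =>
    if ch = '[' ∨ ch = ']' then
      (if quote_char = some "\"" then
        if ¬ (run ≥ 2 ∧ run % 2 = 0) then ['\\', '\\'] else []
      else
        if run % 2 = 0 then ['\\'] else []) ++ ch :: pvLoopB quote_char rs 0
    else
      ch :: pvLoopB quote_char rs (if ch = '\\' then run + 1 else 0)

def left_to_right_escape_unescaped_brackets_alt (pattern : String) (quote_char : Option String) : String :=
  String.ofList (pvLoopB quote_char pattern.toList 0)

-- ===== PRECONDITION & SPEC =====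
def Spec_left_to_right_escape_unescaped_brackets (pattern : String) (quote_char : Option String) (out : String) : Prop := out = left_to_right_escape_unescaped_brackets_alt pattern quote_char
instance (pattern : String) (quote_char : Option String) (out : String) : Decidable (Spec_left_to_right_escape_unescaped_brackets pattern quote_char out) := by unfold Spec_left_to_right_escape_unescaped_brackets; infer_instance

-- ===== CLAIM (what is proved, stated in full; the proofs are below) =====
def Claim_equal_left_to_right_escape_unescaped_brackets : Prop := ∀ (pattern : String) (quote_char : Option String), Dom_left_to_right_escape_unescaped_brackets pattern quote_char → Spec_left_to_right_escape_unescaped_brackets pattern quote_char (left_to_right_escape_unescaped_brackets pattern quote_char)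

-- ===== LEMMAS AND PROOFS =====
theorem pvLoopA_eq_pvLoopB (q : Option String) (cs : List Char) (rest : List Char) (i : Nat)
    (h : cs.drop i = rest) :
    pvLoopA q cs i rest = pvLoopB q rest (pvCountBack cs i) := by
  induction rest generalizing i with
  | nil => simp [pvLoopA, pvLoopB]
  | cons ch rs ih =>
    have hi : i < cs.length := by
      by_contra hlt
      simp [List.drop_eq_nil_of_le (Nat.le_of_not_lt hlt)] at h
    have hget : cs[i]? = some ch := by
      have h0 : (cs.drop i)[0]? = some ch := by simp [h]
      simpa [List.getElem?_drop] using h0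
    have hdrop : cs.drop (i + 1) = rs := by
      have : (cs.drop i).drop 1 = rs := by simp [h]
      simpa [List.drop_drop, Nat.add_comm] using this
    have hnext : pvCountBack cs (i + 1) =
        if ch = '\\' then pvCountBack cs i + 1 else 0 := by
      simp [pvCountBack, List.getD, hget]
    by_cases hbr : ch = '[' ∨ ch = ']'
    · have hnb : ¬ ch = '\\' := by rcases hbr with h' | h' <;> simp [h']
      have hnext0 : pvCountBack cs (i + 1) = 0 := by simp [hnext, hnb]
      have ihr : pvLoopA q cs (i + 1) rs = pvLoopB q rs 0 := by
        rw [ih (i + 1) hdrop, hnext0]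
      by_cases hq : q = some "\""
      · subst hq
        by_cases hesc : pvCountBack cs i ≥ 2 ∧ pvCountBack cs i % 2 = 0 <;>
          simp [pvLoopA, pvLoopB, hbr, hesc, ihr]
      · rcases Nat.mod_two_eq_zero_or_one (pvCountBack cs i) with hm | hm <;>
          simp [pvLoopA, pvLoopB, hbr, hq, hm, ihr]
    · simp [pvLoopA, pvLoopB, hbr, ih (i + 1) hdrop, hnext]

-- ===== VERDICT (by name: the statement is the Claim_ definition above) =====
theorem left_to_right_escape_unescaped_brackets_spec : Claim_equal_left_to_right_escape_unescaped_brackets := by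
  intro pattern quote_char _
  show _ = _
  unfold left_to_right_escape_unescaped_brackets left_to_right_escape_unescaped_brackets_alt
  rw [pvLoopA_eq_pvLoopB quote_char pattern.toList pattern.toList 0 rfl]
  rfl
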